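-- pv_equiv track=rewrite | github.com/AlexeiSLazarev/sbschool | dsa2/task10/task10_bolierplate.py | find_best_combination
-- ===== SOURCE A (Python) =====
-- from collections import defaultdict, deque
-- from typing import List, Tuple, Set
-- from itertools import combinations
-- from typing import List, Tuple
--
-- def find_connected_subgraphs(vertices: List[int], edges: List[Tuple[int, int]]) -> List[Set[int]]:
--     # Create an adjacency list
--     graph = defaultdict(list)
--     for u, v in edges:
--         graph[u].append(v)
--         graph[v].append(u)
--
--     visited = set()
--     subgraphs = []
--
--     def bfs(start):
--         queue = deque([start])
--         connected_component = set()
--         while queue: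
--             node = queue.popleft()
--             if node not in visited:
--                 visited.add(node)
--                 connected_component.add(node)
--                 for neighbor in graph[node]:
--                     if neighbor not in visited:
--                         queue.append(neighbor)
--         return connected_component
--
--     # Find all connected components
--     for vertex in vertices:
--         if vertex not in visited:
--             subgraph = bfs(vertex)
--             subgraphs.append(subgraph)
--
--     return subgraphs
--
-- def generate_edge_combinations(edges: List[Tuple[int, int]]) -> List[List[Tuple[int, int]]]:
--     all_combinations = []
--     n = len(edges)
--
--     for r in range(2, n + 1):  # Start from 2 to exclude subgraphs with less than 2 elements
--         all_combinations.extend(combinations(edges, r))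
--
--     # Convert combinations from tuples to lists
--     all_combinations = [list(comb) for comb in all_combinations]
--
--     return all_combinations
--
-- def find_best_combination(vertices: List[int], edges: List[Tuple[int, int]]) -> List[Tuple[int, int]]:
--     edge_combinations = generate_edge_combinations(edges)
--     max_even_subgraphs = 0
--     best_combination = []
--
--     for comb in edge_combinations:
--         connected_subgraphs = find_connected_subgraphs(vertices, comb)
--         even_subgraph_count = sum(1 for subgraph in connected_subgraphs if len(subgraph) % 2 == 0)
--
--         if even_subgraph_count > max_even_subgraphs:
--             max_even_subgraphs = even_subgraph_count
--             best_combination = comb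
--
--     return best_combination
-- ===== SOURCE B (Python) =====
-- from itertools import combinations
--
-- def _union_edge(blocks, u, v):
--     bu = next((b for b in blocks if u in b), [u])
--     if v in bu:
--         merged = bu
--     else:
--         bv = next((b for b in blocks if v in b), [v])
--         merged = bu + bv
--     rest = [b for b in blocks if u not in b and v not in b]
--     return rest + [merged]
--
-- def _even_component_count(vertices, edges):
--     # disjoint-set-style merging: blocks are the connected components of
--     # the universe {listed vertices} U {edge endpoints}
--     blocks = []
--     for v in vertices:
--         if not any(v in b for b in blocks):
--             blocks.append([v])
--     for u, v in edges:
--         blocks = _union_edge(blocks, u, v)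
--     return sum(1 for b in blocks
--                if len(b) % 2 == 0 and any(x in b for x in vertices))
--
-- def find_best_combination(vertices, edges):
--     best_combination = []
--     max_even = 0
--     for r in range(2, len(edges) + 1):
--         for comb in combinations(edges, r):
--             c = _even_component_count(vertices, comb)
--             if c > max_even:
--                 max_even = c
--                 best_combination = list(comb)
--     return best_combination
-- ===== Notes on version B (the rewrite author's own statement) =====
-- stated objective: alternative
-- what changed: The per-subset BFS component search (adjacency dict + queue + visited set) is replaced by disjoint-set style block merging: start from the deduplicated listed vertices as singleton blocks, merge the blocks of each edge's endpoints, then count even-sized blocks containing a listed vertex; the subset enumeration and strict-improvement tie-break are unchanged.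
import Mathlib
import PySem

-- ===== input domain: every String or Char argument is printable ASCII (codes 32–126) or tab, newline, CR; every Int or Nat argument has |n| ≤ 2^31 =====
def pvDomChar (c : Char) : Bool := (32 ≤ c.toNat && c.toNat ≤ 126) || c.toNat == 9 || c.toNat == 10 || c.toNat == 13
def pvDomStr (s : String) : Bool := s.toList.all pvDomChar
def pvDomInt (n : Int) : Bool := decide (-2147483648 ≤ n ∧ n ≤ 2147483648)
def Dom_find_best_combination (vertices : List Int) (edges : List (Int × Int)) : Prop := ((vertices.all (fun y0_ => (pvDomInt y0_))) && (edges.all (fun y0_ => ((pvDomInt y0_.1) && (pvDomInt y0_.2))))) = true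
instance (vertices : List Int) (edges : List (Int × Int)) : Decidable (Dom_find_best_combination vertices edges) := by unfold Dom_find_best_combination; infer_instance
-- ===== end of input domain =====

-- B replaces A's per-subset BFS component search with disjoint-set style block
-- merging over the subset's edges (objective: alternative algorithm, same
-- enumeration and tie-breaking, hence the same return value).

-- ===== PORT A =====
-- graph = defaultdict(list); for u, v in edges: graph[u].append(v); graph[v].append(u)
def pvBuildGraph (edges : List (Int × Int)) : PySem.Dict Int (List Int) :=
  edges.foldl (fun g e => (g.modify e.1 [] (· ++ [e.2])).modify e.2 [] (· ++ [e.1]))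
    PySem.Dict.empty

-- fuel for the BFS while-loop (a totality guard only; proved sufficient below)
def pvFuel (g : PySem.Dict Int (List Int)) (visited : PySem.Set Int) : Nat :=
  ((g.keys.filter (fun k => !(PySem.Set.contains visited k))).map
    (fun k => 1 + (g.getD k []).length)).sum

-- the 'while queue:' loop of bfs(start); returns (connected_component, visited)
def pvBfs (g : PySem.Dict Int (List Int)) :
    Nat → List Int → PySem.Set Int → PySem.Set Int → PySem.Set Int × PySem.Set Int
  | 0, _, visited, comp => (comp, visited)
  | _ + 1, [], visited, comp => (comp, visited)
  | fuel + 1, node :: rest, visited, comp =>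
    if PySem.Set.contains visited node then
      pvBfs g fuel rest visited comp
    else
      let visited' := PySem.Set.add visited node
      let comp' := PySem.Set.add comp node
      pvBfs g fuel
        (rest ++ (g.getD node []).filter (fun y => !(PySem.Set.contains visited' y)))
        visited' comp'

def pvFindConnectedSubgraphs (vertices : List Int) (edges : List (Int × Int)) :
    List (PySem.Set Int) :=
  let g := pvBuildGraph edges
  (vertices.foldl (fun st v =>
      if PySem.Set.contains st.1 v then st
      else
        let r := pvBfs g (pvFuel g st.1 + 1) [v] st.1 PySem.Set.empty
        (r.2, st.2 ++ [r.1]))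
    (PySem.Set.empty, ([] : List (PySem.Set Int)))).2

-- itertools.combinations(edges, r), in itertools order
def pvCombos : Nat → List (Int × Int) → List (List (Int × Int))
  | 0, _ => [[]]
  | _ + 1, [] => []
  | r + 1, x :: xs => (pvCombos r xs).map (x :: ·) ++ pvCombos (r + 1) xs

def pvGenCombos (edges : List (Int × Int)) : List (List (Int × Int)) :=
  (List.range' 2 (edges.length - 1)).flatMap (fun r => pvCombos r edges)

def find_best_combination (vertices : List Int) (edges : List (Int × Int)) :
    List (Int × Int) :=
  ((pvGenCombos edges).foldl (fun st comb =>
      let c := (pvFindConnectedSubgraphs vertices comb).countP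
        (fun s => s.length % 2 == 0)
      if st.1 < c then (c, comb) else st)
    ((0 : Nat), ([] : List (Int × Int)))).2

-- ===== PORT B =====
def pvUnionEdge (blocks : List (List Int)) (u v : Int) : List (List Int) :=
  let bu := ((blocks.find? (fun b => b.contains u)).getD [u])
  let merged :=
    if bu.contains v then bu
    else bu ++ ((blocks.find? (fun b => b.contains v)).getD [v])
  blocks.filter (fun b => !(b.contains u) && !(b.contains v)) ++ [merged]

def pvInitBlocks (vertices : List Int) : List (List Int) :=
  vertices.foldl (fun bs v => if bs.any (fun b => b.contains v) then bs else bs ++ [[v]]) []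

def pvEvenCount (vertices : List Int) (edges : List (Int × Int)) : Nat :=
  (edges.foldl (fun bs e => pvUnionEdge bs e.1 e.2) (pvInitBlocks vertices)).countP
    (fun b => b.length % 2 == 0 && vertices.any (fun x => b.contains x))

def find_best_combination_alt (vertices : List Int) (edges : List (Int × Int)) :
    List (Int × Int) :=
  ((List.range' 2 (edges.length - 1)).foldl (fun st r =>
      (pvCombos r edges).foldl (fun st comb =>
        let c := pvEvenCount vertices comb
        if st.1 < c then (c, comb) else st) st)
    ((0 : Nat), ([] : List (Int × Int)))).2

-- ===== PRECONDITION & SPEC =====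
def Spec_find_best_combination (vertices : List Int) (edges : List (Int × Int)) (out : List (Int × Int)) : Prop := out = find_best_combination_alt vertices edges
instance (vertices : List Int) (edges : List (Int × Int)) (out : List (Int × Int)) : Decidable (Spec_find_best_combination vertices edges out) := by unfold Spec_find_best_combination; infer_instance

-- ===== CLAIM (what is proved, stated in full; the proofs are below) =====
def Claim_equal_find_best_combination : Prop := ∀ (vertices : List Int) (edges : List (Int × Int)), Dom_find_best_combination vertices edges → Spec_find_best_combination vertices edges (find_best_combination vertices edges)

-- ===== LEMMAS AND PROOFS =====

-- the undirected adjacency and connectivity relations of an edge list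
def pvAdj (es : List (Int × Int)) (x y : Int) : Prop := (x, y) ∈ es ∨ (y, x) ∈ es
def pvConn (es : List (Int × Int)) : Int → Int → Prop := Relation.ReflTransGen (pvAdj es)

lemma pvAdj_symm {es : List (Int × Int)} {x y : Int} (h : pvAdj es x y) : pvAdj es y x :=
  h.elim Or.inr Or.inl

lemma pvConn_symm {es : List (Int × Int)} {x y : Int} (h : pvConn es x y) : pvConn es y x := by
  induction h with
  | refl => exact Relation.ReflTransGen.refl
  | tail _ hbc ih =>
    exact (Relation.ReflTransGen.single (pvAdj_symm hbc)).trans ih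

lemma pvConn_endpoint {es : List (Int × Int)} {a b : Int} (h : pvConn es a b) :
    a = b ∨ ∃ e ∈ es, b = e.1 ∨ b = e.2 := by
  induction h with
  | refl => exact Or.inl rfl
  | tail _ hbc _ =>
    rcases hbc with h1 | h1
    · exact Or.inr ⟨_, h1, Or.inr rfl⟩
    · exact Or.inr ⟨_, h1, Or.inl rfl⟩

lemma pvConn_nil {x y : Int} (h : pvConn [] x y) : x = y := by
  rcases (Relation.ReflTransGen.cases_head h) with h | ⟨c, hc, _⟩
  · exact h
  · rcases hc with h1 | h1 <;> simp at h1

-- adding one edge to the list merges the classes of its endpoints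
lemma pvConn_append_edge {es : List (Int × Int)} {u v x y : Int} :
    pvConn (es ++ [(u, v)]) x y ↔
      pvConn es x y ∨ (pvConn es x u ∧ pvConn es v y) ∨ (pvConn es x v ∧ pvConn es u y) := by
  constructor
  · intro h
    induction h with
    | refl => exact Or.inl Relation.ReflTransGen.refl
    | @tail b c _ hbc ih =>
      have hsplit : pvAdj es b c ∨ (b = u ∧ c = v) ∨ (b = v ∧ c = u) := by
        rcases hbc with h1 | h1 <;> rw [List.mem_append] at h1 <;>
          rcases h1 with h1 | h1
        · exact Or.inl (Or.inl h1)
        · simp only [List.mem_singleton, Prod.mk.injEq] at h1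
          exact Or.inr (Or.inl h1)
        · exact Or.inl (Or.inr h1)
        · simp only [List.mem_singleton, Prod.mk.injEq] at h1
          exact Or.inr (Or.inr ⟨h1.2, h1.1⟩)
      rcases hsplit with hadj | ⟨hb, hc⟩ | ⟨hb, hc⟩
      · rcases ih with h2 | ⟨h2, h3⟩ | ⟨h2, h3⟩
        · exact Or.inl (h2.tail hadj)
        · exact Or.inr (Or.inl ⟨h2, h3.tail hadj⟩)
        · exact Or.inr (Or.inr ⟨h2, h3.tail hadj⟩)
      · subst hb; subst hc
        rcases ih with h2 | ⟨h2, _⟩ | ⟨h2, _⟩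
        · exact Or.inr (Or.inl ⟨h2, Relation.ReflTransGen.refl⟩)
        · exact Or.inr (Or.inl ⟨h2, Relation.ReflTransGen.refl⟩)
        · exact Or.inl h2
      · subst hb; subst hc
        rcases ih with h2 | ⟨h2, _⟩ | ⟨h2, _⟩
        · exact Or.inr (Or.inr ⟨h2, Relation.ReflTransGen.refl⟩)
        · exact Or.inl h2
        · exact Or.inr (Or.inr ⟨h2, Relation.ReflTransGen.refl⟩)
  · intro h
    have hmono : ∀ a b : Int, pvConn es a b → pvConn (es ++ [(u, v)]) a b := by
      intro a b hab
      refine Relation.ReflTransGen.mono (fun p q hpq => ?_) hab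
      rcases hpq with h1 | h1
      · exact Or.inl (List.mem_append_left _ h1)
      · exact Or.inr (List.mem_append_left _ h1)
    have hedge : pvConn (es ++ [(u, v)]) u v :=
      Relation.ReflTransGen.single
        (Or.inl (List.mem_append_right _ (List.mem_singleton_self _)))
    rcases h with h1 | ⟨h1, h2⟩ | ⟨h1, h2⟩
    · exact hmono _ _ h1
    · exact ((hmono _ _ h1).trans hedge).trans (hmono _ _ h2)
    · exact ((hmono _ _ h1).trans (pvConn_symm hedge)).trans (hmono _ _ h2)

-- membership in A's adjacency dict is exactly pvAdj
lemma pvBuildGraph_mem (es : List (Int × Int)) (x y : Int) :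
    y ∈ (pvBuildGraph es).getD x [] ↔ pvAdj es x y := by
  have haux : ∀ (es : List (Int × Int)) (g : PySem.Dict Int (List Int)) (x y : Int),
      y ∈ (es.foldl (fun g e =>
          (g.modify e.1 [] (· ++ [e.2])).modify e.2 [] (· ++ [e.1])) g).getD x [] ↔
        y ∈ g.getD x [] ∨ pvAdj es x y := by
    intro es
    induction es with
    | nil => intro g x y; simp [pvAdj]
    | cons e es ih =>
      intro g x y
      rcases e with ⟨u, v⟩
      rw [List.foldl_cons, ih]
      clear ih
      simp only [pvAdj, List.mem_cons, Prod.mk.injEq, PySem.Dict.getD_modify]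
      by_cases h1 : x = v <;> by_cases h2 : x = u <;> by_cases h3 : v = u <;>
        subst_vars <;> (try simp_all [List.mem_append]) <;> tauto
  rw [pvBuildGraph, haux]
  simp [PySem.Dict.getD_empty]

lemma pvBuildGraph_keys_nodup (es : List (Int × Int)) :
    (pvBuildGraph es).keys.Nodup := by
  have haux : ∀ (es : List (Int × Int)) (g : PySem.Dict Int (List Int)), g.keys.Nodup →
      (es.foldl (fun g e =>
        (g.modify e.1 [] (· ++ [e.2])).modify e.2 [] (· ++ [e.1])) g).keys.Nodup := by
    intro es
    induction es with
    | nil => intro g h; exact h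
    | cons e es ih =>
      intro g h
      rw [List.foldl_cons]
      refine ih _ ?_
      have h1 : ∀ (d : PySem.Dict Int (List Int)) (k : Int) (f : List Int → List Int),
          d.keys.Nodup → (d.modify k [] f).keys.Nodup := by
        intro d k f hd
        rw [PySem.Dict.keys_modify]
        exact PySem.Dict.nodup_keys_insert _ _ _ hd
      exact h1 _ _ _ (h1 _ _ _ h)
  exact haux es PySem.Dict.empty PySem.Dict.nodup_keys_empty

lemma pv_sum_remove (w : Int → Nat) :
    ∀ (l : List Int) (a : Int), l.Nodup → a ∈ l →
      ((l.filter (fun k => !(k == a))).map w).sum + w a = (l.map w).sum := by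
  intro l
  induction l with
  | nil => intro a _ ha; cases ha
  | cons x l ih =>
    intro a hnd ha
    rcases List.mem_cons.mp ha with rfl | ha'
    · have hxl : a ∉ l := (List.nodup_cons.mp hnd).1
      have hfe : l.filter (fun k => !(k == a)) = l := by
        refine List.filter_eq_self.mpr (fun b hb => ?_)
        have : b ≠ a := fun he => hxl (he ▸ hb)
        simp [this]
      have hcons : (a :: l).filter (fun k => !(k == a)) = l.filter (fun k => !(k == a)) := by
        simp
      rw [hcons, hfe, List.map_cons, List.sum_cons]
      omega
    · have hx : x ≠ a := fun he => (List.nodup_cons.mp hnd).1 (he ▸ ha')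
      have := ih a (List.nodup_cons.mp hnd).2 ha'
      have hcons : (x :: l).filter (fun k => !(k == a)) = x :: l.filter (fun k => !(k == a)) := by
        simp [hx]
      rw [hcons, List.map_cons, List.map_cons, List.sum_cons, List.sum_cons]
      omega

lemma pvFuel_add_mem (g : PySem.Dict Int (List Int)) (visited : List Int) (node : Int)
    (hk : g.keys.Nodup) (hmem : node ∈ g.keys) (hnv : node ∉ visited) :
    pvFuel g (PySem.Set.add visited node) + (1 + (g.getD node []).length) = pvFuel g visited := by
  rw [PySem.Set.add_of_not_mem hnv]
  unfold pvFuel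
  have hpt : ∀ k ∈ g.keys,
      (!(PySem.Set.contains (visited ++ [node]) k)) =
        ((fun k => !(k == node)) k && ((fun k => !(PySem.Set.contains visited k)) k)) := by
    intro k _
    by_cases h1 : k ∈ visited <;> by_cases h2 : k = node <;> simp [h1, h2]
  rw [List.filter_congr hpt, ← List.filter_filter]
  have hmem2 : node ∈ g.keys.filter (fun k => !(PySem.Set.contains visited k)) := by
    simp [List.mem_filter, hmem, hnv]
  have hnd : (g.keys.filter (fun k => !(PySem.Set.contains visited k))).Nodup :=
    hk.filter _
  exact pv_sum_remove (fun k => 1 + (g.getD k []).length) _ node hnd hmem2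

lemma pvFuel_add_not_mem (g : PySem.Dict Int (List Int)) (visited : List Int) (node : Int)
    (hmem : node ∉ g.keys) :
    pvFuel g (PySem.Set.add visited node) = pvFuel g visited := by
  unfold pvFuel
  congr 1
  rw [PySem.Set.add_eq_ite]
  split_ifs with h
  · rfl
  · refine congrArg _ (List.filter_congr (fun k hkk => ?_))
    have : k ≠ node := fun he => hmem (he ▸ hkk)
    simp [this]

-- the BFS while-loop computes the pvConn-class of start (the class is disjoint
-- from the pvAdj-closed initial visited set V0)
lemma pvBfs_spec (es : List (Int × Int)) (start : Int) (V0 : List Int)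
    (hV0 : ∀ x ∈ V0, ∀ y, pvAdj es x y → y ∈ V0) :
    ∀ (fuel : Nat) (queue visited comp : List Int),
      pvFuel (pvBuildGraph es) visited + queue.length ≤ fuel →
      visited.Nodup → comp.Nodup →
      (∀ x, x ∈ visited ↔ x ∈ V0 ∨ x ∈ comp) →
      (∀ x ∈ comp, x ∉ V0) →
      (∀ q ∈ queue, pvConn es start q) →
      (∀ x ∈ comp, pvConn es start x) →
      (∀ x ∈ comp, ∀ y, pvAdj es x y → y ∈ comp ∨ y ∈ queue) →
      (start ∈ comp ∨ start ∈ queue ∨ start ∈ V0) →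
      (∀ x, x ∈ (pvBfs (pvBuildGraph es) fuel queue visited comp).1 ↔
          (pvConn es start x ∧ x ∉ V0)) ∧
      (∀ x, x ∈ (pvBfs (pvBuildGraph es) fuel queue visited comp).2 ↔
          (x ∈ V0 ∨ x ∈ (pvBfs (pvBuildGraph es) fuel queue visited comp).1)) ∧
      (pvBfs (pvBuildGraph es) fuel queue visited comp).1.Nodup ∧
      (pvBfs (pvBuildGraph es) fuel queue visited comp).2.Nodup := by
  have hterm : ∀ (visited comp : List Int), visited.Nodup → comp.Nodup →
      (∀ x, x ∈ visited ↔ x ∈ V0 ∨ x ∈ comp) →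
      (∀ x ∈ comp, x ∉ V0) →
      (∀ x ∈ comp, pvConn es start x) →
      (∀ x ∈ comp, ∀ y, pvAdj es x y → y ∈ comp) →
      (start ∈ comp ∨ start ∈ V0) →
      (∀ x, x ∈ comp ↔ (pvConn es start x ∧ x ∉ V0)) ∧
      (∀ x, x ∈ visited ↔ (x ∈ V0 ∨ x ∈ comp)) ∧ comp.Nodup ∧ visited.Nodup := by
    intro visited comp hvn hcn hI1 hI2 hI4 hI5 hI6
    refine ⟨?_, hI1, hcn, hvn⟩
    intro x
    constructor
    · intro hx; exact ⟨hI4 x hx, hI2 x hx⟩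
    · rintro ⟨hconn, hxV0⟩
      have hcover : ∀ y, pvConn es start y → y ∈ comp ∨ y ∈ V0 := by
        intro y hy
        induction hy with
        | refl => exact hI6
        | @tail b c _ hbc ihy =>
          rcases ihy with hb | hb
          · exact Or.inl (hI5 b hb c hbc)
          · exact Or.inr (hV0 b hb c hbc)
      rcases hcover x hconn with h | h
      · exact h
      · exact absurd h hxV0
  intro fuel
  induction fuel with
  | zero =>
    intro queue visited comp hf hvn hcn hI1 hI2 hI3 hI4 hI5 hI6
    have hq : queue = [] := by
      cases queue with
      | nil => rfl
      | cons a t => simp at hf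
    subst hq
    simp only [pvBfs]
    refine hterm visited comp hvn hcn hI1 hI2 hI4 ?_ ?_
    · intro x hx y hy
      rcases hI5 x hx y hy with h | h
      · exact h
      · cases h
    · rcases hI6 with h | h | h
      · exact Or.inl h
      · cases h
      · exact Or.inr h
  | succ fuel ih =>
    intro queue visited comp hf hvn hcn hI1 hI2 hI3 hI4 hI5 hI6
    cases queue with
    | nil =>
      simp only [pvBfs]
      refine hterm visited comp hvn hcn hI1 hI2 hI4 ?_ ?_
      · intro x hx y hy
        rcases hI5 x hx y hy with h | h
        · exact h
        · cases h
      · rcases hI6 with h | h | h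
        · exact Or.inl h
        · cases h
        · exact Or.inr h
    | cons node rest =>
      simp only [pvBfs]
      by_cases hvis : node ∈ visited
      · rw [if_pos (by simpa using hvis)]
        have hnodeC : node ∈ V0 → node ∈ V0 := id
        refine ih rest visited comp ?_ hvn hcn hI1 hI2 ?_ hI4 ?_ ?_
        · simp only [List.length_cons] at hf
          omega
        · exact fun q hq => hI3 q (List.mem_cons_of_mem _ hq)
        · intro x hx y hy
          rcases hI5 x hx y hy with h | h
          · exact Or.inl h
          · rcases List.mem_cons.mp h with rfl | h2
            · rcases (hI1 y).mp hvis with hyV | hyC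
              · exact absurd ((hV0 y hyV x (pvAdj_symm hy))) (hI2 x hx)
              · exact Or.inl hyC
            · exact Or.inr h2
        · rcases hI6 with h | h | h
          · exact Or.inl h
          · rcases List.mem_cons.mp h with rfl | h2
            · rcases (hI1 start).mp hvis with hyV | hyC
              · exact Or.inr (Or.inr hyV)
              · exact Or.inl hyC
            · exact Or.inr (Or.inl h2)
          · exact Or.inr (Or.inr h)
      · rw [if_neg (by simpa using hvis)]
        have hnV0 : node ∉ V0 := fun h => hvis ((hI1 node).mpr (Or.inl h))
        have hnC : node ∉ comp := fun h => hvis ((hI1 node).mpr (Or.inr h))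
        have hconnN : pvConn es start node := hI3 node (by simp)
        have hAdjN : ∀ y, y ∈ (pvBuildGraph es).getD node [] ↔ pvAdj es node y :=
          fun y => pvBuildGraph_mem es node y
        have hnotV0adj : ∀ y, pvAdj es node y → y ∉ V0 := by
          intro y hy hyV
          exact hnV0 (hV0 y hyV node (pvAdj_symm hy))
        refine ih _ _ _ ?_ (PySem.Set.nodup_add _ _ hvn) (PySem.Set.nodup_add _ _ hcn)
          ?_ ?_ ?_ ?_ ?_ ?_
        · -- fuel bound
          simp only [List.length_append, List.length_cons] at hf ⊢
          refine Nat.le_trans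
            (Nat.add_le_add_left (Nat.add_le_add_left (List.length_filter_le _ _) rest.length) _) ?_
          by_cases hkey : node ∈ (pvBuildGraph es).keys
          · have := pvFuel_add_mem (pvBuildGraph es) visited node
              (pvBuildGraph_keys_nodup es) hkey hvis
            omega
          · have heq := pvFuel_add_not_mem (pvBuildGraph es) visited node hkey
            have hnil : (pvBuildGraph es).getD node [] = [] := by
              refine PySem.Dict.getD_of_not_contains _ _ ?_
              rw [← Bool.not_eq_true, PySem.Dict.contains_iff_mem_keys]
              exact hkey
            rw [hnil]
            simp only [List.length_nil]
            omega
        · intro x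
          rw [PySem.Set.mem_add, PySem.Set.mem_add, hI1]
          tauto
        · intro x hx
          rcases (PySem.Set.mem_add _ _ _).mp hx with h | rfl
          · exact hI2 x h
          · exact hnV0
        · intro q hq
          rcases List.mem_append.mp hq with h | h
          · exact hI3 q (List.mem_cons_of_mem _ h)
          · have : pvAdj es node q := (hAdjN q).mp (List.mem_of_mem_filter h)
            exact hconnN.tail this
        · intro x hx
          rcases (PySem.Set.mem_add _ _ _).mp hx with h | rfl
          · exact hI4 x h
          · exact hconnN
        · intro x hx y hy
          rcases (PySem.Set.mem_add _ _ _).mp hx with h | heq2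
          · rcases hI5 x h y hy with h2 | h2
            · exact Or.inl ((PySem.Set.mem_add _ _ _).mpr (Or.inl h2))
            · rcases List.mem_cons.mp h2 with rfl | h3
              · exact Or.inl ((PySem.Set.mem_add _ _ _).mpr (Or.inr rfl))
              · exact Or.inr (List.mem_append_left _ h3)
          · rw [heq2] at hy
            by_cases hyv : y ∈ PySem.Set.add visited node
            · rcases (PySem.Set.mem_add _ _ _).mp hyv with h2 | rfl
              · rcases (hI1 y).mp h2 with h3 | h3
                · exact absurd h3 (hnotV0adj y hy)
                · exact Or.inl ((PySem.Set.mem_add _ _ _).mpr (Or.inl h3))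
              · exact Or.inl ((PySem.Set.mem_add _ _ _).mpr (Or.inr rfl))
            · refine Or.inr (List.mem_append_right _ ?_)
              rw [List.mem_filter]
              exact ⟨(hAdjN y).mpr hy, by simpa using hyv⟩
        · rcases hI6 with h | h | h
          · exact Or.inl ((PySem.Set.mem_add _ _ _).mpr (Or.inl h))
          · rcases List.mem_cons.mp h with rfl | h2
            · exact Or.inl ((PySem.Set.mem_add _ _ _).mpr (Or.inr rfl))
            · exact Or.inr (Or.inl (List.mem_append_left _ h2))
          · exact Or.inr (Or.inr h)

-- the invariant of B's block list
def pvInv (es : List (Int × Int)) (U : Int → Prop) (blocks : List (List Int)) : Prop :=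
  (∀ b ∈ blocks, b ≠ [] ∧ b.Nodup) ∧
  List.Pairwise (fun b b' => ∀ x, x ∈ b → x ∉ b') blocks ∧
  (∀ b ∈ blocks, ∀ x ∈ b, ∀ y, (y ∈ b ↔ pvConn es x y)) ∧
  (∀ x, U x ↔ ∃ b ∈ blocks, x ∈ b) ∧
  (∀ e ∈ es, U e.1 ∧ U e.2)

lemma pvInitBlocks_inv (vertices : List Int) :
    pvInv [] (fun x => x ∈ vertices) (pvInitBlocks vertices) := by
  have hshape : pvInitBlocks vertices = (PySem.Set.ofList vertices).map (fun v => [v]) := by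
    induction vertices using List.reverseRecOn with
    | nil => rfl
    | append_singleton vs v ih =>
      unfold pvInitBlocks at ih ⊢
      rw [List.foldl_append, List.foldl_cons, List.foldl_nil, ih,
        PySem.Set.ofList_append_singleton, PySem.Set.add_eq_ite]
      by_cases hv : v ∈ PySem.Set.ofList vs
      · have hany : ((PySem.Set.ofList vs).map (fun v => [v])).any (fun b => b.contains v) = true := by
          simp only [List.any_map, List.any_eq_true]
          exact ⟨v, hv, by simp⟩
        simp [(PySem.Set.mem_ofList vs v).mp hv]
      · have hany : ((PySem.Set.ofList vs).map (fun v => [v])).any (fun b => b.contains v) = false := by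
          rw [Bool.eq_false_iff]
          intro htrue
          rw [List.any_map, List.any_eq_true] at htrue
          rcases htrue with ⟨u, hu, hc⟩
          simp only [Function.comp_apply, List.contains_cons, List.contains_nil,
            Bool.or_false, beq_iff_eq] at hc
          exact hv (by rw [hc]; exact hu)
        have hvv : v ∉ vs := fun h => hv ((PySem.Set.mem_ofList vs v).mpr h)
        simp [hvv]
  rw [hshape]
  refine ⟨?_, ?_, ?_, ?_, by simp⟩
  · intro b hb
    rcases List.mem_map.mp hb with ⟨x, _, rfl⟩
    exact ⟨by simp, by simp⟩
  · rw [List.pairwise_map]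
    refine (PySem.Set.nodup_ofList vertices).imp_of_mem ?_
    intro a b _ _ hab x hx hxb
    simp only [List.mem_singleton] at hx hxb
    exact hab (hx.symm.trans hxb)
  · intro b hb x hx y
    rcases List.mem_map.mp hb with ⟨z, _, rfl⟩
    simp only [List.mem_singleton] at hx ⊢
    subst hx
    constructor
    · rintro rfl; exact Relation.ReflTransGen.refl
    · intro h; exact (pvConn_nil h).symm
  · intro x
    constructor
    · intro hx
      exact ⟨[x], List.mem_map_of_mem ((PySem.Set.mem_ofList vertices x).mpr hx), by simp⟩
    · rintro ⟨b, hb, hxb⟩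
      rcases List.mem_map.mp hb with ⟨z, hz, rfl⟩
      simp only [List.mem_singleton] at hxb
      exact hxb ▸ ((PySem.Set.mem_ofList vertices z).mp hz)

lemma pvUnionEdge_inv {es : List (Int × Int)} {U : Int → Prop} {blocks : List (List Int)}
    (h : pvInv es U blocks) (u v : Int) :
    pvInv (es ++ [(u, v)]) (fun x => U x ∨ x = u ∨ x = v) (pvUnionEdge blocks u v) := by
  obtain ⟨hne, hdisj, hchar, hU, hEnd⟩ := h
  have hBlk : ∀ w : Int, w ∈ ((blocks.find? (fun b => b.contains w)).getD [w]) ∧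
      ((blocks.find? (fun b => b.contains w)).getD [w]).Nodup ∧
      (∀ y, y ∈ ((blocks.find? (fun b => b.contains w)).getD [w]) ↔ pvConn es w y) ∧
      ((blocks.find? (fun b => b.contains w)).getD [w] ∈ blocks ∨
        (blocks.find? (fun b => b.contains w)).getD [w] = [w]) := by
    intro w
    cases hf : blocks.find? (fun b => b.contains w) with
    | some b0 =>
      have hb0 : b0 ∈ blocks := List.mem_of_find?_eq_some hf
      have hwb : w ∈ b0 := by
        have := List.find?_some hf; simpa using this
      simp only [Option.getD_some]
      exact ⟨hwb, (hne b0 hb0).2, fun y => hchar b0 hb0 w hwb y, Or.inl hb0⟩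
    | none =>
      have hno : ∀ b ∈ blocks, w ∉ b := by
        intro b hb hwb
        have := List.find?_eq_none.mp hf b hb
        simp only [Bool.not_eq_true] at this
        rw [List.contains_eq_mem] at this
        simp at this
        exact this hwb
      have hnU : ¬ U w := fun hUw => by
        rcases (hU w).mp hUw with ⟨b, hb, hwb⟩; exact hno b hb hwb
      have hnAdj : ∀ z, ¬ pvAdj es w z := by
        rintro z (hz | hz)
        · exact hnU (hEnd _ hz).1
        · exact hnU (hEnd _ hz).2
      simp only [Option.getD_none]
      refine ⟨List.mem_singleton_self w, List.nodup_singleton w, fun y => ?_, by simp⟩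
      simp only [List.mem_singleton]
      constructor
      · rintro rfl; exact Relation.ReflTransGen.refl
      · intro hc
        rcases Relation.ReflTransGen.cases_head hc with he | ⟨c, hc1, _⟩
        · exact he.symm
        · exact absurd hc1 (hnAdj c)
  obtain ⟨huBu, hBuN, hBuC, _⟩ := hBlk u
  obtain ⟨hvBv, hBvN, hBvC, _⟩ := hBlk v
  set Bu := (blocks.find? (fun b => b.contains u)).getD [u] with hBudef
  set Bv := (blocks.find? (fun b => b.contains v)).getD [v] with hBvdef
  set merged := if Bu.contains v then Bu else Bu ++ Bv with hmdef
  have hmerge_mem : ∀ y, y ∈ merged ↔ (pvConn es u y ∨ pvConn es v y) := by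
    intro y
    rw [hmdef]
    by_cases hcv : v ∈ Bu
    · have huv : pvConn es u v := (hBuC v).mp hcv
      rw [if_pos (by simpa using hcv)]
      rw [hBuC y]
      constructor
      · exact Or.inl
      · rintro (h1 | h1)
        · exact h1
        · exact huv.trans h1
    · rw [if_neg (by simpa using hcv)]
      rw [List.mem_append, hBuC y, hBvC y]
  have hnuv : ¬ Bu.contains v = true → ¬ pvConn es u v := by
    intro hcv hconn
    exact hcv (by simpa using (hBuC v).mpr hconn)
  have hmerge_nodup : merged.Nodup := by
    rw [hmdef]
    by_cases hcv : Bu.contains v = true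
    · rw [if_pos hcv]; exact hBuN
    · rw [if_neg hcv]
      refine List.Nodup.append hBuN hBvN ?_
      intro y hy1 hy2
      exact hnuv hcv (((hBuC y).mp hy1).trans (pvConn_symm ((hBvC y).mp hy2)))
  have hu_m : u ∈ merged := (hmerge_mem u).mpr (Or.inl Relation.ReflTransGen.refl)
  have hv_m : v ∈ merged := (hmerge_mem v).mpr (Or.inr Relation.ReflTransGen.refl)
  have hmem' : ∀ b', b' ∈ pvUnionEdge blocks u v ↔
      ((b' ∈ blocks ∧ u ∉ b' ∧ v ∉ b') ∨ b' = merged) := by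
    intro b'
    show b' ∈ (blocks.filter (fun b => !(b.contains u) && !(b.contains v)) ++ [merged]) ↔ _
    rw [List.mem_append, List.mem_filter, List.mem_singleton]
    constructor
    · rintro (⟨hb, hp⟩ | h1)
      · rw [Bool.and_eq_true] at hp
        exact Or.inl ⟨hb, by simpa using hp.1, by simpa using hp.2⟩
      · exact Or.inr h1
    · rintro (⟨hb, hu', hv'⟩ | h1)
      · exact Or.inl ⟨hb, by simp [hu', hv']⟩
      · exact Or.inr h1
  have key : ∀ x y, (pvConn es u x ∨ pvConn es v x) →
      (pvConn (es ++ [(u, v)]) x y ↔ (pvConn es u y ∨ pvConn es v y)) := by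
    intro x y hx
    rw [pvConn_append_edge]
    constructor
    · rintro (h1 | ⟨h1, h2⟩ | ⟨h1, h2⟩)
      · rcases hx with hx | hx
        · exact Or.inl (hx.trans h1)
        · exact Or.inr (hx.trans h1)
      · exact Or.inr h2
      · exact Or.inl h2
    · intro h1
      rcases hx with hx | hx <;> rcases h1 with h1 | h1
      · exact Or.inl ((pvConn_symm hx).trans h1)
      · exact Or.inr (Or.inl ⟨pvConn_symm hx, h1⟩)
      · exact Or.inr (Or.inr ⟨pvConn_symm hx, h1⟩)
      · exact Or.inl ((pvConn_symm hx).trans h1)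
  have hrest_char : ∀ b ∈ blocks, u ∉ b → v ∉ b → ∀ x ∈ b, ∀ y,
      (y ∈ b ↔ pvConn (es ++ [(u, v)]) x y) := by
    intro b hb hub hvb x hx y
    rw [pvConn_append_edge]
    constructor
    · intro hy
      exact Or.inl ((hchar b hb x hx y).mp hy)
    · rintro (h1 | ⟨h1, _⟩ | ⟨h1, _⟩)
      · exact (hchar b hb x hx y).mpr h1
      · exact absurd ((hchar b hb x hx u).mpr h1) hub
      · exact absurd ((hchar b hb x hx v).mpr h1) hvb
  refine ⟨?_, ?_, ?_, ?_, ?_⟩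
  · intro b' hb'
    rcases (hmem' b').mp hb' with ⟨hb, _, _⟩ | rfl
    · exact hne b' hb
    · exact ⟨fun he => List.not_mem_nil (he ▸ hu_m), hmerge_nodup⟩
  · show List.Pairwise _ (blocks.filter (fun b => !(b.contains u) && !(b.contains v)) ++ [merged])
    rw [List.pairwise_append]
    refine ⟨hdisj.filter _, List.pairwise_singleton _ _, ?_⟩
    intro b hb m hm
    rw [List.mem_singleton] at hm
    subst hm
    rw [List.mem_filter] at hb
    obtain ⟨hb, hp⟩ := hb
    rw [Bool.and_eq_true] at hp
    have hub : u ∉ b := by simpa using hp.1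
    have hvb : v ∉ b := by simpa using hp.2
    intro x hx hxm
    rcases (hmerge_mem x).mp hxm with h1 | h1
    · exact hub ((hchar b hb x hx u).mpr (pvConn_symm h1))
    · exact hvb ((hchar b hb x hx v).mpr (pvConn_symm h1))
  · intro b' hb' x hx y
    rcases (hmem' b').mp hb' with ⟨hb, hub, hvb⟩ | rfl
    · exact hrest_char b' hb hub hvb x hx y
    · have hx' := (hmerge_mem x).mp hx
      rw [hmerge_mem y, key x y hx']
  · intro x
    constructor
    · rintro (hUx | rfl | rfl)
      · rcases (hU x).mp hUx with ⟨b, hb, hxb⟩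
        by_cases hub : u ∈ b
        · have : pvConn es u x := (hchar b hb u hub x).mp hxb
          exact ⟨merged, (hmem' merged).mpr (Or.inr rfl), (hmerge_mem x).mpr (Or.inl this)⟩
        · by_cases hvb : v ∈ b
          · have : pvConn es v x := (hchar b hb v hvb x).mp hxb
            exact ⟨merged, (hmem' merged).mpr (Or.inr rfl), (hmerge_mem x).mpr (Or.inr this)⟩
          · exact ⟨b, (hmem' b).mpr (Or.inl ⟨hb, hub, hvb⟩), hxb⟩
      · exact ⟨merged, (hmem' merged).mpr (Or.inr rfl), hu_m⟩
      · exact ⟨merged, (hmem' merged).mpr (Or.inr rfl), hv_m⟩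
    · rintro ⟨b', hb', hxb⟩
      rcases (hmem' b').mp hb' with ⟨hb, _, _⟩ | rfl
      · exact Or.inl ((hU x).mpr ⟨b', hb, hxb⟩)
      · rcases (hmerge_mem x).mp hxb with h1 | h1
        · rcases pvConn_endpoint h1 with rfl | ⟨e, he, hxe⟩
          · exact Or.inr (Or.inl rfl)
          · rcases hxe with hxe | hxe
            · exact Or.inl (hxe ▸ (hEnd e he).1)
            · exact Or.inl (hxe ▸ (hEnd e he).2)
        · rcases pvConn_endpoint h1 with rfl | ⟨e, he, hxe⟩
          · exact Or.inr (Or.inr rfl)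
          · rcases hxe with hxe | hxe
            · exact Or.inl (hxe ▸ (hEnd e he).1)
            · exact Or.inl (hxe ▸ (hEnd e he).2)
  · intro e he
    rw [List.mem_append, List.mem_singleton] at he
    rcases he with he | rfl
    · exact ⟨Or.inl (hEnd e he).1, Or.inl (hEnd e he).2⟩
    · exact ⟨Or.inr (Or.inl rfl), Or.inr (Or.inr rfl)⟩

lemma pvFold_inv :
    ∀ (rem : List (Int × Int)) (U : Int → Prop) (processed : List (Int × Int))
      (blocks : List (List Int)),
      pvInv processed U blocks →
      pvInv (processed ++ rem)
        (fun x => U x ∨ ∃ e ∈ rem, x = e.1 ∨ x = e.2)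
        (rem.foldl (fun bs e => pvUnionEdge bs e.1 e.2) blocks) := by
  intro rem
  induction rem with
  | nil =>
    intro U processed blocks h
    simpa using h
  | cons e rem ih =>
    intro U processed blocks h
    rcases e with ⟨u, v⟩
    rw [List.foldl_cons]
    have h1 := pvUnionEdge_inv h u v
    have h2 := ih _ (processed ++ [(u, v)]) _ h1
    have hes : processed ++ [(u, v)] ++ rem = processed ++ ((u, v) :: rem) := by
      simp
    rw [hes] at h2
    rcases h2 with ⟨a, b, c, d, e5⟩
    refine ⟨a, b, c, fun x => ?_, ?_⟩
    case refine_2 =>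
      intro e he
      rcases e5 e he with ⟨hh1, hh2⟩
      constructor
      · rcases hh1 with (hU | hx) | hx
        · exact Or.inl hU
        · exact Or.inr ⟨(u, v), by simp, hx⟩
        · rcases hx with ⟨e', he', hx⟩
          exact Or.inr ⟨e', List.mem_cons_of_mem _ he', hx⟩
      · rcases hh2 with (hU | hx) | hx
        · exact Or.inl hU
        · exact Or.inr ⟨(u, v), by simp, hx⟩
        · rcases hx with ⟨e', he', hx⟩
          exact Or.inr ⟨e', List.mem_cons_of_mem _ he', hx⟩
    rw [← d x]
    constructor
    · rintro (hU | he)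
      · exact Or.inl (Or.inl hU)
      · rcases he with ⟨e', he', hx⟩
        rcases List.mem_cons.mp he' with rfl | he''
        · exact Or.inl (Or.inr hx)
        · exact Or.inr ⟨e', he'', hx⟩
    · rintro ((hU | hx) | ⟨e', he', hx⟩)
      · exact Or.inl hU
      · exact Or.inr ⟨(u, v), by simp, hx⟩
      · exact Or.inr ⟨e', List.mem_cons_of_mem _ he', hx⟩

-- A's per-vertex loop body, named for the proofs below
def pvStep (es : List (Int × Int)) (st : PySem.Set Int × List (PySem.Set Int)) (v : Int) :
    PySem.Set Int × List (PySem.Set Int) :=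
  if PySem.Set.contains st.1 v then st
  else
    let r := pvBfs (pvBuildGraph es) (pvFuel (pvBuildGraph es) st.1 + 1) [v] st.1 PySem.Set.empty
    (r.2, st.2 ++ [r.1])

lemma pvFCS_eq (vertices : List Int) (es : List (Int × Int)) :
    pvFindConnectedSubgraphs vertices es =
      (vertices.foldl (pvStep es) (PySem.Set.empty, ([] : List (PySem.Set Int)))).2 := rfl

-- the central count equality: A's even-component count over a combination
-- equals B's
lemma pvCount_eq (vertices : List Int) (es : List (Int × Int)) :
    (pvFindConnectedSubgraphs vertices es).countP (fun s => s.length % 2 == 0) =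
      pvEvenCount vertices es := by
  have hinv := pvFold_inv es (fun x => x ∈ vertices) [] (pvInitBlocks vertices)
    (pvInitBlocks_inv vertices)
  rw [List.nil_append] at hinv
  set blocks := es.foldl (fun bs e => pvUnionEdge bs e.1 e.2) (pvInitBlocks vertices)
    with hbdef
  obtain ⟨hne, hdisj, hchar, hU, hEnd⟩ := hinv
  have hsym : Symmetric (fun b b' : List Int => ∀ x ∈ b, x ∉ b') :=
    fun a b hab x hx hxa => hab x hxa hx
  have huniq : ∀ b ∈ blocks, ∀ b' ∈ blocks, ∀ x, x ∈ b → x ∈ b' → b = b' := by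
    intro b hb b' hb' x hxb hxb'
    by_cases he : b = b'
    · exact he
    · exact absurd hxb' (List.Pairwise.forall hsym hdisj hb hb' he x hxb)
  have hbn : blocks.Nodup := by
    refine hdisj.imp_of_mem ?_
    intro a b ha _ hr he
    rcases List.exists_mem_of_ne_nil a (hne a ha).1 with ⟨x, hx⟩
    exact hr x hx (he ▸ hx)
  have hVclosed : ∀ (used : List (List Int)), (∀ b ∈ used, b ∈ blocks) →
      ∀ (visited : List Int), (∀ x, x ∈ visited ↔ ∃ b ∈ used, x ∈ b) →
      ∀ x ∈ visited, ∀ y, pvAdj es x y → y ∈ visited := by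
    intro used hused visited hvchar x hx y hxy
    rcases (hvchar x).mp hx with ⟨b, hbu, hxb⟩
    have hyb : y ∈ b := (hchar b (hused b hbu) x hxb y).mpr (Relation.ReflTransGen.single hxy)
    exact (hvchar y).mpr ⟨b, hbu, hyb⟩
  have houter : ∀ (vs : List Int), (∀ v ∈ vs, v ∈ vertices) →
      ∀ (visited : List Int) (used : List (List Int)) (subs : List (PySem.Set Int)),
      visited.Nodup → used.Nodup → (∀ b ∈ used, b ∈ blocks) →
      (∀ x, x ∈ visited ↔ ∃ b ∈ used, x ∈ b) →
      subs.countP (fun s => s.length % 2 == 0) = used.countP (fun b => b.length % 2 == 0) →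
      (∀ b ∈ used, ∃ x ∈ b, x ∈ vertices) →
      ∃ used' : List (List Int),
        used'.Nodup ∧ (∀ b ∈ used', b ∈ blocks) ∧
        (∀ x, x ∈ (vs.foldl (pvStep es) (visited, subs)).1 ↔ ∃ b ∈ used', x ∈ b) ∧
        ((vs.foldl (pvStep es) (visited, subs)).2.countP (fun s => s.length % 2 == 0) =
          used'.countP (fun b => b.length % 2 == 0)) ∧
        (∀ b ∈ used', ∃ x ∈ b, x ∈ vertices) ∧
        (∀ x ∈ visited, x ∈ (vs.foldl (pvStep es) (visited, subs)).1) ∧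
        (∀ v ∈ vs, v ∈ (vs.foldl (pvStep es) (visited, subs)).1) := by
    intro vs
    induction vs with
    | nil =>
      intro _ visited used subs _ hun hub hvchar hcnt hlst
      exact ⟨used, hun, hub, hvchar, hcnt, hlst, fun x hx => hx, fun v hv => by cases hv⟩
    | cons v vs ih =>
      intro hvs visited used subs hvn hun hub hvchar hcnt hlst
      rw [List.foldl_cons]
      by_cases hv : v ∈ visited
      · have hstep : pvStep es (visited, subs) v = (visited, subs) := by
          unfold pvStep
          rw [if_pos (by simpa using hv)]
        rw [hstep]
        obtain ⟨used', h1, h2, h3, h4, h5, h6, h7⟩ :=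
          ih (fun w hw => hvs w (List.mem_cons_of_mem _ hw)) visited used subs hvn hun hub
            hvchar hcnt hlst
        refine ⟨used', h1, h2, h3, h4, h5, h6, ?_⟩
        intro w hw
        rcases List.mem_cons.mp hw with rfl | hw2
        · exact h6 w hv
        · exact h7 w hw2
      · obtain ⟨hr1, hr2, hr1n, hr2n⟩ := pvBfs_spec es v visited
          (hVclosed used hub visited hvchar)
          (pvFuel (pvBuildGraph es) visited + 1) [v] visited PySem.Set.empty
          (by simp)
          hvn List.nodup_nil
          (fun x => by simp [hvchar x])
          (by simp)
          (fun q hq => by rw [List.mem_singleton] at hq; exact hq ▸ Relation.ReflTransGen.refl)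
          (by simp)
          (by simp)
          (Or.inr (Or.inl (by simp)))
        have hvU : v ∈ vertices ∨ ∃ e ∈ es, v = e.1 ∨ v = e.2 := Or.inl (hvs v (by simp))
        obtain ⟨bv, hbv, hvbv⟩ := (hU v).mp hvU
        have hbvchar : ∀ y, y ∈ bv ↔ pvConn es v y := hchar bv hbv v hvbv
        set r := pvBfs (pvBuildGraph es) (pvFuel (pvBuildGraph es) visited + 1)
          [v] visited PySem.Set.empty with hrdef
        have hCbv : ∀ x, x ∈ r.1 ↔ x ∈ bv := by
          intro x
          rw [hr1 x, hbvchar x]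
          constructor
          · exact fun h => h.1
          · intro h
            refine ⟨h, fun hxv => ?_⟩
            rcases (hvchar x).mp hxv with ⟨b, hbu, hxb⟩
            have hvb : v ∈ b := (hchar b (hub b hbu) x hxb v).mpr (pvConn_symm h)
            exact hv ((hvchar v).mpr ⟨b, hbu, hvb⟩)
        have hstep : pvStep es (visited, subs) v = (r.2, subs ++ [r.1]) := by
          unfold pvStep
          rw [if_neg (by simpa using hv)]
        rw [hstep]
        have hbvn : bv.Nodup := (hne bv hbv).2
        have hperm : r.1.Perm bv := (List.perm_ext_iff_of_nodup hr1n hbvn).mpr hCbv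
        have hlen : r.1.length = bv.length := hperm.length_eq
        have hbvused : bv ∉ used := fun hbu => hv ((hvchar v).mpr ⟨bv, hbu, hvbv⟩)
        have hun' : (used ++ [bv]).Nodup := by
          refine List.Nodup.append hun (List.nodup_singleton _) ?_
          intro a ha hab
          rw [List.mem_singleton] at hab
          exact hbvused (hab ▸ ha)
        have hub' : ∀ b ∈ used ++ [bv], b ∈ blocks := by
          intro b hb
          rcases List.mem_append.mp hb with h | h
          · exact hub b h
          · rw [List.mem_singleton] at h; exact h ▸ hbv
        have hvchar' : ∀ x, x ∈ r.2 ↔ ∃ b ∈ used ++ [bv], x ∈ b := by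
          intro x
          rw [hr2 x]
          constructor
          · rintro (h | h)
            · rcases (hvchar x).mp h with ⟨b, hbu, hxb⟩
              exact ⟨b, List.mem_append_left _ hbu, hxb⟩
            · exact ⟨bv, List.mem_append_right _ (by simp), (hCbv x).mp h⟩
          · rintro ⟨b, hb, hxb⟩
            rcases List.mem_append.mp hb with h | h
            · exact Or.inl ((hvchar x).mpr ⟨b, h, hxb⟩)
            · rw [List.mem_singleton] at h
              exact Or.inr ((hCbv x).mpr (h ▸ hxb))
        have hcnt' : (subs ++ [r.1]).countP (fun s => s.length % 2 == 0) =
            (used ++ [bv]).countP (fun b => b.length % 2 == 0) := by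
          rw [List.countP_append, List.countP_append, hcnt]
          congr 1
          simp [List.countP_cons, hlen]
        have hlst' : ∀ b ∈ used ++ [bv], ∃ x ∈ b, x ∈ vertices := by
          intro b hb
          rcases List.mem_append.mp hb with h | h
          · exact hlst b h
          · rw [List.mem_singleton] at h
            exact ⟨v, h ▸ hvbv, hvs v (by simp)⟩
        obtain ⟨used', h1, h2, h3, h4, h5, h6, h7⟩ :=
          ih (fun w hw => hvs w (List.mem_cons_of_mem _ hw)) r.2 (used ++ [bv]) (subs ++ [r.1])
            hr2n hun' hub' hvchar' hcnt' hlst'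
        refine ⟨used', h1, h2, h3, h4, h5, ?_, ?_⟩
        · intro x hx
          exact h6 x ((hr2 x).mpr (Or.inl hx))
        · intro w hw
          rcases List.mem_cons.mp hw with rfl | hw2
          · exact h6 w ((hr2 w).mpr (Or.inr ((hCbv w).mpr hvbv)))
          · exact h7 w hw2
  obtain ⟨used', hn', hsub', hchar', hcnt', hlst', _, hallv⟩ :=
    houter vertices (fun v hv => hv) PySem.Set.empty [] []
      List.nodup_nil List.nodup_nil (by intro b hb; cases hb)
      (fun x => by simp [PySem.Set.empty]) rfl (by intro b hb; cases hb)
  rw [pvFCS_eq, hcnt']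
  unfold pvEvenCount
  rw [← hbdef,
    ← @List.countP_filter _ (fun b : List Int => b.length % 2 == 0)
      (fun b => vertices.any (fun x => b.contains x)) blocks]
  have hpermF : used'.Perm (blocks.filter (fun b => vertices.any (fun x => b.contains x))) := by
    rw [List.perm_ext_iff_of_nodup hn' (hbn.filter _)]
    intro b
    rw [List.mem_filter]
    constructor
    · intro hb
      refine ⟨hsub' b hb, ?_⟩
      rcases hlst' b hb with ⟨x, hxb, hxv⟩
      rw [List.any_eq_true]
      exact ⟨x, hxv, by simpa using hxb⟩
    · rintro ⟨hb, hq⟩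
      rw [List.any_eq_true] at hq
      rcases hq with ⟨x, hxv, hxb⟩
      have hxb' : x ∈ b := by simpa using hxb
      have hxvis := hallv x hxv
      rcases (hchar' x).mp hxvis with ⟨b2, hb2, hxb2⟩
      have hbb := huniq b hb b2 (hsub' b2 hb2) x hxb' hxb2
      exact hbb ▸ hb2
  exact List.Perm.countP_eq _ hpermF

-- ===== VERDICT (by name: the statement is the Claim_ definition above) =====
theorem find_best_combination_spec : Claim_equal_find_best_combination := by
  intro vertices edges _
  unfold Spec_find_best_combination find_best_combination find_best_combination_alt pvGenCombos
  rw [List.foldl_flatMap]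
  have h : (fun (st : Nat × List (Int × Int)) comb =>
      let c := (pvFindConnectedSubgraphs vertices comb).countP (fun s => s.length % 2 == 0)
      if st.1 < c then (c, comb) else st) =
      (fun (st : Nat × List (Int × Int)) comb =>
      let c := pvEvenCount vertices comb
      if st.1 < c then (c, comb) else st) := by
    funext st comb
    simp only [pvCount_eq]
  rw [h]
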